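-- pv_equiv track=rewrite | github.com/ignajaja/coding-II | practica/composicion.py | eliminar_primera
-- ===== SOURCE A (Python) =====
-- def eliminar_primera(x, num):
--     acumulador = 0
--     exponente = 0
--     condicion = False
--
--     while num > 0:
--         if not num % 10 == x or condicion == True:
--             acumulador += (num % 10) * (10**exponente)
--             exponente += 1
--         else:
--             condicion = True
--
--         num //= 10
--     return acumulador
-- ===== SOURCE B (Python) =====
-- def eliminar_primera(x, num):
--     def sin_primera(n):
--         # returns n with its lowest digit equal to x removed (if any)
--         if n <= 0:
--             return 0
--         d = n % 10
--         if d == x: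
--             return n // 10
--         return sin_primera(n // 10) * 10 + d
--     return sin_primera(num)
-- ===== Notes on version B (the rewrite author's own statement) =====
-- stated objective: simpler
-- what changed: Replaces the flag-and-exponent accumulator loop (acumulador += digit * 10**exponente with a 'condicion' flag scanned over every digit) by a short early-cut recursion that returns the remaining higher digits immediately at the first match and rebuilds the result Horner-style (r*10+d) on the way back, with no flag and no power computation.
import Mathlib
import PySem

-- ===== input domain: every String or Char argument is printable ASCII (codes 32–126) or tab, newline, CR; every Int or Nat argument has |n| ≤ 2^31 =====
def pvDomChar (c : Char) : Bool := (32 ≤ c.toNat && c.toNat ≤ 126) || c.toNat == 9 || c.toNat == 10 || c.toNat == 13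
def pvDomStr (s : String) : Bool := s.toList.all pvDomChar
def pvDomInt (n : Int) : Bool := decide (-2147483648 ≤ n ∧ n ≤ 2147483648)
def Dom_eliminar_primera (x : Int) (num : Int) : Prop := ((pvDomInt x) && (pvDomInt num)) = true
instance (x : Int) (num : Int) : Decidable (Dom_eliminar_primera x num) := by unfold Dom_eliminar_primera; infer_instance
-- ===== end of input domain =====

-- B replaces A's flag-and-exponent accumulator loop by an early-cut recursion that rebuilds
-- the result Horner-style on the way back (objective: simpler; same asymptotic cost).

-- ===== PORT A =====
-- A's while loop as structural recursion on the state (num, acumulador, exponente, condicion).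
-- 'exponente' starts at 0 and is only incremented, so it is carried as a Nat (10**exponente = 10 ^ exp).
def pvALoop (x : Int) (num acumulador : Int) (exponente : Nat) (condicion : Bool) : Int :=
  if h : num > 0 then
    if ¬ (PySem.Int.mod num 10 = x) ∨ condicion = true then
      pvALoop x (PySem.Int.floordiv num 10)
        (acumulador + (PySem.Int.mod num 10) * (10 ^ exponente)) (exponente + 1) condicion
    else
      pvALoop x (PySem.Int.floordiv num 10) acumulador exponente true
  else
    acumulador
termination_by num.toNat
decreasing_by
  all_goals
    rw [PySem.Int.floordiv_eq_ediv_of_pos (by omega : (0:Int) < 10)]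
    omega

def eliminar_primera (x : Int) (num : Int) : Int :=
  pvALoop x num 0 0 false

-- ===== PORT B =====
-- Source B's helper sin_primera: early-cut recursion, Horner rebuild on return.
def pvSinPrimera (x : Int) (n : Int) : Int :=
  if h : n ≤ 0 then 0
  else
    let d := PySem.Int.mod n 10
    if d = x then PySem.Int.floordiv n 10
    else pvSinPrimera x (PySem.Int.floordiv n 10) * 10 + d
termination_by n.toNat
decreasing_by
  rw [PySem.Int.floordiv_eq_ediv_of_pos (by omega : (0:Int) < 10)]
  omega

def eliminar_primera_alt (x : Int) (num : Int) : Int :=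
  pvSinPrimera x num

-- ===== PRECONDITION & SPEC =====
def Spec_eliminar_primera (x : Int) (num : Int) (out : Int) : Prop := out = eliminar_primera_alt x num
instance (x : Int) (num : Int) (out : Int) : Decidable (Spec_eliminar_primera x num out) := by unfold Spec_eliminar_primera; infer_instance

-- ===== CLAIM (what is proved, stated in full; the proofs are below) =====
def Claim_equal_eliminar_primera : Prop := ∀ (x : Int) (num : Int), Dom_eliminar_primera x num → Spec_eliminar_primera x num (eliminar_primera x num)

-- ===== LEMMAS AND PROOFS =====

-- Once 'condicion' is set, A's loop just appends the remaining digits: it computes acc + n * 10^exp.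
theorem pvALoop_true (x : Int) : ∀ (k : Nat) (n acc : Int) (exp : Nat),
    0 ≤ n → n.toNat = k → pvALoop x n acc exp true = acc + n * 10 ^ exp := by
  intro k
  induction k using Nat.strong_induction_on with
  | _ k ih =>
    intro n acc exp hn hk
    rw [pvALoop]
    by_cases h : n > 0
    · have hfd : PySem.Int.floordiv n 10 = n / 10 :=
        PySem.Int.floordiv_eq_ediv_of_pos (by omega)
      have hmd : PySem.Int.mod n 10 = n % 10 :=
        PySem.Int.mod_eq_emod_of_pos (by omega)
      rw [dif_pos h, if_pos (Or.inr rfl), hfd, hmd]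
      rw [ih (n / 10).toNat (by omega) (n / 10) _ (exp + 1) (by omega) rfl]
      rw [pow_succ]
      linear_combination (10 ^ exp : Int) * Int.mul_ediv_add_emod n 10
    · have hn0 : n = 0 := by omega
      simp [hn0]

-- With the flag still off, A's loop computes acc + (B's result on n) * 10^exp.
theorem pvALoop_false (x : Int) : ∀ (k : Nat) (n acc : Int) (exp : Nat),
    0 ≤ n → n.toNat = k → pvALoop x n acc exp false = acc + pvSinPrimera x n * 10 ^ exp := by
  intro k
  induction k using Nat.strong_induction_on with
  | _ k ih =>
    intro n acc exp hn hk
    rw [pvALoop, pvSinPrimera]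
    by_cases h : n > 0
    · have hfd : PySem.Int.floordiv n 10 = n / 10 :=
        PySem.Int.floordiv_eq_ediv_of_pos (by omega)
      rw [dif_pos h, dif_neg (by omega : ¬ n ≤ 0)]
      by_cases hx : PySem.Int.mod n 10 = x
      · rw [if_pos hx, if_neg (fun hc => hc.elim (fun hne => hne hx) (fun hb => by simp at hb)), hfd]
        rw [pvALoop_true x (n / 10).toNat (n / 10) acc exp (by omega) rfl]
      · rw [if_neg hx, if_pos (Or.inl hx), hfd]
        rw [ih (n / 10).toNat (by omega) (n / 10) _ (exp + 1) (by omega) rfl]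
        ring
    · have hn0 : n = 0 := by omega
      simp [hn0]

-- ===== VERDICT (by name: the statement is the Claim_ definition above) =====
theorem eliminar_primera_spec : Claim_equal_eliminar_primera := by
  intro x num _
  unfold Spec_eliminar_primera eliminar_primera eliminar_primera_alt
  by_cases h : 0 ≤ num
  · rw [pvALoop_false x num.toNat num 0 0 h rfl]; ring
  · rw [pvALoop, pvSinPrimera]
    simp [show ¬ num > 0 by omega, show num ≤ 0 by omega]
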